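-- pv_equiv track=rewrite | github.com/SubhrajyotiSen/KannadaHandwritingRecognition | preprocessing/slant.py | findxm
-- ===== SOURCE A (Python) =====
-- def findxm(thin_image, row, col):
--     xm = 0
--     for i in range(1, row-1):
--         for j in range(1, col-1):
--             if(thin_image[i][j] == 1):
--                 if(i > xm):
--                     xm = i
--     return xm
-- ===== SOURCE B (Python) =====
-- def findxm(thin_image, row, col):
--     for i in range(row - 2, 0, -1):
--         if any(thin_image[i][j] == 1 for j in range(1, col - 1)):
--             return i
--     return 0
-- ===== Notes on version B (the rewrite author's own statement) =====
-- stated objective: alternative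
-- what changed: Replaces the full ascending scan that tracks a running maximum with a bottom-up reverse scan that returns the first row index containing a set pixel (the maximum by construction), using any() over the interior columns.
import Mathlib
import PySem

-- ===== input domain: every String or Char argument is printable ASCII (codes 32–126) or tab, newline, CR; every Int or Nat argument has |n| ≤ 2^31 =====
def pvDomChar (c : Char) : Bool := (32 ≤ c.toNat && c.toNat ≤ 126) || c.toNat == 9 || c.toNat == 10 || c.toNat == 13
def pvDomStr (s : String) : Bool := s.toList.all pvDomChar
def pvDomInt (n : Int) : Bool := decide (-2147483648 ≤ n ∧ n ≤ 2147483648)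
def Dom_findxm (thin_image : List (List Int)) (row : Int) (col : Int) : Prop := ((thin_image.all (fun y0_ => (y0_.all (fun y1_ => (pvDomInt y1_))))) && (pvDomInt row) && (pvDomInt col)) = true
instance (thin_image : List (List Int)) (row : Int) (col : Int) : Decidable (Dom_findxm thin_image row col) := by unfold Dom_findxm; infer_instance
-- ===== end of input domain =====

-- B replaces A's exhaustive ascending scan with a running maximum by a bottom-up
-- reverse scan returning the first row containing a set pixel (objective: alternative).
-- ===== PORT A =====
-- Transliteration of A: ascending double loop tracking the running maximum row index.
-- thin_image[i][j] raises IndexError out of range in Python; here pyGetD's default is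
-- only reachable outside Pre_findxm, where nothing is claimed.
def findxm (thin_image : List (List Int)) (row : Int) (col : Int) : Int :=
  (PySem.List.pyRange 1 (row - 1) 1).foldl (fun xm i =>
    (PySem.List.pyRange 1 (col - 1) 1).foldl (fun xm j =>
      if PySem.List.pyGetD (PySem.List.pyGetD thin_image i []) j 0 == 1 then
        (if i > xm then i else xm) else xm) xm) 0

-- ===== PORT B =====
-- B: bottom-up reverse scan; first interior row containing a set pixel, else 0.
def rowHasPixelB (thin_image : List (List Int)) (i : Int) (col : Int) : Bool :=
  (PySem.List.pyRange 1 (col - 1) 1).any (fun j =>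
    PySem.List.pyGetD (PySem.List.pyGetD thin_image i []) j 0 == 1)

def findxm_alt (thin_image : List (List Int)) (row : Int) (col : Int) : Int :=
  ((PySem.List.pyRange (row - 2) 0 (-1)).find? (fun i => rowHasPixelB thin_image i col)).getD 0

-- ===== PRECONDITION & SPEC =====
-- Pre_: exactly the inputs where Python A returns (no IndexError): when both loop ranges are
-- nonempty, every accessed row index 1..row-2 is in range and every accessed row has length ≥ col-1.
def Pre_findxm (thin_image : List (List Int)) (row : Int) (col : Int) : Prop :=
  3 ≤ row → 3 ≤ col →
    (row - 1 ≤ (thin_image.length : Int) ∧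
     ∀ r ∈ (thin_image.take (row - 1).toNat).drop 1, col - 1 ≤ (r.length : Int))
instance (thin_image : List (List Int)) (row : Int) (col : Int) : Decidable (Pre_findxm thin_image row col) := by unfold Pre_findxm; infer_instance

def pvWitness_findxm : List (List Int) × Int × Int := ([[0, 0, 0], [0, 1, 0], [0, 0, 0]], 3, 3)

def Spec_findxm (thin_image : List (List Int)) (row : Int) (col : Int) (out : Int) : Prop := out = findxm_alt thin_image row col
instance (thin_image : List (List Int)) (row : Int) (col : Int) (out : Int) : Decidable (Spec_findxm thin_image row col out) := by unfold Spec_findxm; infer_instance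

-- ===== CLAIM (what is proved, stated in full; the proofs are below) =====
def Claim_equal_findxm : Prop := ∀ (thin_image : List (List Int)) (row : Int) (col : Int), Dom_findxm thin_image row col → Pre_findxm thin_image row col → Spec_findxm thin_image row col (findxm thin_image row col)

-- ===== LEMMAS AND PROOFS =====

-- A's inner loop over one row: if any interior pixel is set, the state becomes max xm i.
theorem inner_fold_eq (p : Int → Bool) (i : Int) :
    ∀ (L : List Int) (xm : Int),
      L.foldl (fun xm j => if p j then (if i > xm then i else xm) else xm) xm
        = if L.any p then max xm i else xm := by
  intro L
  induction L with
  | nil => intro xm; simp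
  | cons a L ih =>
    intro xm
    by_cases hp : p a = true
    · simp [List.foldl_cons, List.any_cons, hp, ih]
      by_cases h : i > xm
      · simp [h]; omega
      · simp [h]; intro _; omega
    · simp at hp
      simp [List.foldl_cons, List.any_cons, hp, ih]

-- max-tracking fold over a strictly increasing list = last satisfying element,
-- read off as the first match of the reversed list.
theorem maxfold_eq_find (q : Int → Bool) :
    ∀ (L : List Int) (xm : Int), L.Pairwise (· < ·) → (∀ x ∈ L, xm < x) →
      L.foldl (fun xm i => if q i then max xm i else xm) xm
        = (L.reverse.find? q).getD xm := by
  intro L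
  induction L with
  | nil => intro xm _ _; simp
  | cons a L ih =>
    intro xm hpw hlt
    have ha : xm < a := hlt a (by simp)
    have hpw' : L.Pairwise (· < ·) := hpw.of_cons
    have haL : ∀ x ∈ L, a < x := by
      intro x hx; exact (List.pairwise_cons.mp hpw).1 x hx
    have step : (if q a then max xm a else xm) = (if q a then a else xm) := by
      split <;> [omega; rfl]
    have hlt' : ∀ x ∈ L, (if q a then max xm a else xm) < x := by
      intro x hx
      have := haL x hx
      split <;> omega
    simp only [List.foldl_cons, List.reverse_cons]
    rw [ih _ hpw' hlt']
    rw [List.find?_append]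
    cases hfind : L.reverse.find? q with
    | some y => simp
    | none =>
      simp only [Option.none_or]
      by_cases hq : q a = true
      · simp [hq]; omega
      · simp at hq
        simp [List.find?, hq]

theorem findxm_eq_alt (thin_image : List (List Int)) (row : Int) (col : Int) :
    findxm thin_image row col = findxm_alt thin_image row col := by
  unfold findxm findxm_alt rowHasPixelB
  have h1 : ∀ xm i : Int,
      (PySem.List.pyRange 1 (col - 1) 1).foldl (fun xm j =>
        if PySem.List.pyGetD (PySem.List.pyGetD thin_image i []) j 0 == 1 then
          (if i > xm then i else xm) else xm) xm
      = if (PySem.List.pyRange 1 (col - 1) 1).any (fun j =>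
            PySem.List.pyGetD (PySem.List.pyGetD thin_image i []) j 0 == 1)
        then max xm i else xm := by
    intro xm i; exact inner_fold_eq _ i _ xm
  simp only [h1]
  have hrev : PySem.List.pyRange (row - 2) 0 (-1)
      = (PySem.List.pyRange 1 (row - 1) 1).reverse := by
    have h2 : row - 2 + 1 = row - 1 := by omega
    have := PySem.List.pyRange_neg_one_eq_reverse (row - 2) 0
    rw [h2] at this
    simpa using this
  rw [hrev]
  exact maxfold_eq_find _ (PySem.List.pyRange 1 (row - 1) 1) 0
    (PySem.List.pairwise_lt_pyRange_one 1 (row - 1))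
    (fun x hx => ((PySem.List.mem_pyRange_one).mp hx).1)

-- ===== VERDICT (by name: the statement is the Claim_ definition above) =====
theorem findxm_spec : Claim_equal_findxm := by
  intro thin_image row col _ _
  exact findxm_eq_alt thin_image row col
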